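-- pv_equiv track=rewrite | github.com/BrunelJacques/Noethys-Matthania | noethys/Ol/OL_Liste_inscriptions.py | Compacte
-- ===== SOURCE A (Python) =====
-- def Compacte(adresse):
--     compactee = ""
--     if adresse:
--         lst=adresse.split("\n")
--         for ligne in lst:
--             if len(ligne) > 0:
--                 compactee += ligne + "\n"
--         if len(compactee)>0:
--             compactee = compactee[:-1]
--     return compactee
-- ===== SOURCE B (Python) =====
-- def Compacte(adresse):
--     if not adresse:
--         return ""
--     out = []
--     prev_nl = True
--     for ch in adresse:
--         if ch == "\n":
--             prev_nl = True
--         else: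
--             if prev_nl and out:
--                 out.append("\n")
--             out.append(ch)
--             prev_nl = False
--     return "".join(out)
-- ===== Notes on version B (the rewrite author's own statement) =====
-- stated objective: alternative
-- what changed: Replaces split-into-lines + filtering loop + trailing-newline trim by a single character-level state-machine pass that emits one separating newline before each new nonempty line.
import Mathlib
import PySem

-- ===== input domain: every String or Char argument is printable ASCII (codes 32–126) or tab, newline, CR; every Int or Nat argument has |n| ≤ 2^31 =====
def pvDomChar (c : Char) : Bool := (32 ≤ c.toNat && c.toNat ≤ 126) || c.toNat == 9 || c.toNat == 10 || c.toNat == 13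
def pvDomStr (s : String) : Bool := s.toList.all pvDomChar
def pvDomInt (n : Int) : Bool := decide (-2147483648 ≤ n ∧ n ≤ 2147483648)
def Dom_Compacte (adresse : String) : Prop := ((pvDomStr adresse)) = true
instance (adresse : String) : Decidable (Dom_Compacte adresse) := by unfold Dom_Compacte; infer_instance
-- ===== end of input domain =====

-- B: a single character-level state-machine pass instead of A's split/filter/trim; return values proved equal.

-- ===== PORT A =====
-- A, transliterated over code points via PySem.Chars: split on "\n", append each
-- nonempty line plus "\n", then drop the trailing "\n" (compactee[:-1]) if nonempty.
def Compacte (adresse : String) : String :=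
  if adresse = "" then ""
  else
    let lst := PySem.Chars.splitOn adresse.toList ['\n']
    let compactee := lst.foldl (fun acc ligne => if ligne.length > 0 then acc ++ ligne ++ ['\n'] else acc) []
    let compactee := if compactee.length > 0 then PySem.List.slice compactee none (some (-1)) else compactee
    String.ofList compactee

-- ===== PORT B =====
-- B's loop: acc = out, Bool = prev_nl flag.
def CompacteAltLoop : List Char → List Char → Bool → List Char
  | acc, [], _ => acc
  | acc, c :: rest, prevNl =>
    if c = '\n' then CompacteAltLoop acc rest true
    else CompacteAltLoop ((if prevNl && !acc.isEmpty then acc ++ ['\n'] else acc) ++ [c]) rest false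

def Compacte_alt (adresse : String) : String :=
  if adresse = "" then "" else String.ofList (CompacteAltLoop [] adresse.toList true)

-- ===== PRECONDITION & SPEC =====
def Spec_Compacte (adresse : String) (out : String) : Prop := out = Compacte_alt adresse
instance (adresse : String) (out : String) : Decidable (Spec_Compacte adresse out) := by unfold Spec_Compacte; infer_instance

-- ===== CLAIM (what is proved, stated in full; the proofs are below) =====
def Claim_equal_Compacte : Prop := ∀ (adresse : String), Dom_Compacte adresse → Spec_Compacte adresse (Compacte adresse)

-- ===== LEMMAS AND PROOFS =====

-- Proof-side model of splitting on '\n': (first segment, remaining segments).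
def splitNl : List Char → List Char × List (List Char)
  | [] => ([], [])
  | c :: rest =>
    let p := splitNl rest
    if c = '\n' then ([], p.1 :: p.2) else (c :: p.1, p.2)

def segsOf (l : List Char) : List (List Char) := (splitNl l).1 :: (splitNl l).2

-- Join with a single '\n' between segments.
def joinNl : List (List Char) → List Char
  | [] => []
  | [x] => x
  | x :: y :: t => x ++ '\n' :: joinNl (y :: t)

-- the nonempty segments, and the value both programs compute
def neOf (l : List Char) : List (List Char) := (segsOf l).filter (· ≠ [])
def iOf (l : List Char) : List Char := joinNl (neOf l)
-- continuation value of B's loop in state prev_nl = false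
def icOf (l : List Char) : List Char :=
  joinNl ((splitNl l).1 :: (splitNl l).2.filter (· ≠ []))

theorem go_eq (fuel : Nat) : ∀ (l cur : List Char) (acc : List (List Char)),
    l.length ≤ fuel →
    PySem.Chars.splitOn.go ['\n'] fuel l cur acc
      = acc.reverse ++ (cur.reverse ++ (splitNl l).1) :: (splitNl l).2 := by
  induction fuel with
  | zero =>
    intro l cur acc h
    have : l = [] := by cases l <;> simp_all
    subst this
    simp [PySem.Chars.splitOn.go, splitNl]
  | succ n ih =>
    intro l cur acc h
    cases l with
    | nil => simp [PySem.Chars.splitOn.go, splitNl]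
    | cons c rest =>
      by_cases hc : c = '\n'
      · subst hc
        rw [PySem.Chars.splitOn.go]
        rw [if_pos (by simp [List.isPrefixOf])]
        simp only [List.length_singleton, List.drop_succ_cons, List.drop_zero]
        rw [ih rest [] _ (by simp at h; omega)]
        simp [splitNl]
      · rw [PySem.Chars.splitOn.go]
        rw [if_neg (by simp [List.isPrefixOf]; exact fun h' => hc h'.symm)]
        rw [ih rest (c :: cur) acc (by simp at h; omega)]
        simp [splitNl, hc]

theorem splitOn_eq (l : List Char) : PySem.Chars.splitOn l ['\n'] = segsOf l := by
  rw [PySem.Chars.splitOn, go_eq (l.length + 1) l [] [] (by omega)]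
  simp [segsOf]

theorem foldl_eq (segs : List (List Char)) : ∀ (init : List Char),
    segs.foldl (fun acc ligne => if ligne.length > 0 then acc ++ ligne ++ ['\n'] else acc) init
      = init ++ ((segs.filter (· ≠ [])).map (· ++ ['\n'])).flatten := by
  induction segs with
  | nil => simp
  | cons x t ih =>
    intro init
    by_cases hx : x = []
    · subst hx; rw [List.foldl_cons]; simp only [List.length_nil, gt_iff_lt, Nat.lt_irrefl, if_false]; rw [ih]; simp
    · have : x.length > 0 := by cases x <;> simp_all
      rw [List.foldl_cons]
      simp only [this, if_pos]
      rw [ih]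
      simp [hx]

theorem flatten_ne (xs : List (List Char)) (h : xs ≠ []) :
    ((xs.map (· ++ ['\n'])).flatten) ≠ [] := by
  cases xs with
  | nil => simp at h
  | cons x t => simp

theorem dropLast_flatten (xs : List (List Char)) (h : xs ≠ []) :
    ((xs.map (· ++ ['\n'])).flatten).dropLast = joinNl xs := by
  induction xs with
  | nil => simp at h
  | cons x t ih =>
    cases t with
    | nil => simp [joinNl]
    | cons y u =>
      show ((x ++ ['\n']) ++ ((y::u).map (fun s => s ++ ['\n'])).flatten).dropLast = joinNl (x::y::u)
      rw [List.append_assoc,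
        List.dropLast_append_of_ne_nil (l' := x) (l := ['\n'] ++ ((y::u).map (fun s => s ++ ['\n'])).flatten) (by simp),
        List.dropLast_append_of_ne_nil (l' := ['\n']) (flatten_ne (y::u) (by simp)),
        ih (by simp)]
      rfl

theorem joinNl_head (c : Char) (x : List Char) (xs : List (List Char)) :
    joinNl ((c :: x) :: xs) = c :: joinNl (x :: xs) := by
  cases xs <;> simp [joinNl]

theorem loop_spec (l : List Char) : ∀ (acc : List Char),
    (CompacteAltLoop acc l true
       = acc ++ (if acc = [] ∨ neOf l = [] then iOf l else '\n' :: iOf l))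
    ∧ (acc ≠ [] → CompacteAltLoop acc l false = acc ++ icOf l) := by
  induction l with
  | nil =>
    intro acc
    constructor
    · simp [CompacteAltLoop, neOf, segsOf, splitNl, iOf, joinNl]
    · intro _; simp [CompacteAltLoop, icOf, splitNl, joinNl]
  | cons c rest ih =>
    intro acc
    by_cases hc : c = '\n'
    · subst hc
      have hne : neOf ('\n' :: rest) = neOf rest := by
        simp [neOf, segsOf, splitNl]
      have hi : iOf ('\n' :: rest) = iOf rest := by simp [iOf, hne]
      have hic : icOf ('\n' :: rest) = joinNl ([] :: neOf rest) := by
        simp [icOf, splitNl, neOf, segsOf]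
      constructor
      · show CompacteAltLoop acc rest true = _
        rw [(ih acc).1, hne, hi]
      · intro hacc
        show CompacteAltLoop acc rest true = _
        rw [(ih acc).1, hic]
        rcases h : neOf rest with _ | ⟨z, w⟩
        · simp [hacc, h, iOf, joinNl]
        · simp only [hacc, h, false_or, joinNl, iOf]
          simp
    · have hsp : splitNl (c :: rest) = (c :: (splitNl rest).1, (splitNl rest).2) := by
        simp [splitNl, hc]
      have hne : neOf (c :: rest) = (c :: (splitNl rest).1) :: (splitNl rest).2.filter (· ≠ []) := by
        simp [neOf, segsOf, hsp]
      have hi : iOf (c :: rest) = c :: icOf rest := by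
        rw [iOf, hne, joinNl_head, icOf]
      have hic : icOf (c :: rest) = c :: icOf rest := by
        rw [icOf, hsp, joinNl_head, icOf]
      constructor
      · show CompacteAltLoop acc (c :: rest) true = _
        rw [CompacteAltLoop]
        rw [if_neg hc]
        by_cases ha : acc = []
        · subst ha
          simp only [List.isEmpty_nil, Bool.not_true, Bool.and_false, Bool.false_eq_true,
            if_false, List.nil_append]
          rw [(ih [c]).2 (by simp), hi]
          simp [hne]
        · have : (true && !acc.isEmpty) = true := by simp [ha]
          rw [this, if_pos rfl]
          rw [(ih (acc ++ ['\n'] ++ [c])).2 (by simp), hi]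
          rw [if_neg (by simp [ha, hne])]
          simp
      · intro hacc
        show CompacteAltLoop acc (c :: rest) false = _
        rw [CompacteAltLoop, if_neg hc]
        simp only [Bool.false_and, Bool.false_eq_true, if_false]
        rw [(ih (acc ++ [c])).2 (by simp), hic]
        simp

-- ===== VERDICT (by name: the statement is the Claim_ definition above) =====
theorem Compacte_spec : Claim_equal_Compacte := by
  intro adresse _
  unfold Spec_Compacte Compacte Compacte_alt
  by_cases h : adresse = ""
  · simp [h]
  · rw [if_neg h, if_neg h]
    rw [splitOn_eq]
    simp only []
    rw [foldl_eq, List.nil_append]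
    rw [show (segsOf adresse.toList).filter (· ≠ []) = neOf adresse.toList from rfl]
    rw [(loop_spec adresse.toList []).1]
    simp only [List.nil_append, true_or, if_pos]
    rcases hne : neOf adresse.toList with _ | ⟨z, w⟩
    · simp [hne, iOf, joinNl]
    · rw [← hne]
      have hfl := flatten_ne (neOf adresse.toList) (by rw [hne]; simp)
      rw [if_pos (by cases hx : ((neOf adresse.toList).map (· ++ ['\n'])).flatten with
            | nil => exact absurd hx hfl
            | cons a b => simp)]
      rw [PySem.List.slice_to_neg_one, dropLast_flatten _ (by rw [hne]; simp)]
      rfl
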